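-- pv_equiv track=rewrite | github.com/TianLangHin/Y2023_AdventOfCode | src/08/day8.py | overlap_cycle
-- ===== SOURCE A (Python) =====
-- from collections import namedtuple
--
-- Cycle = namedtuple('Cycle', ['offset', 'period'])
--
-- def overlap_cycle(arg1: Cycle, arg2: Cycle) -> Cycle:
--     # We aim to find the first value X = p + as = q + bt
--     p, a = arg1
--     q, b = arg2
--     if a > b:
--         a, b = b, a
--         p, q = q, p
--     # Use extended Euclidean algorithm.
--     old_r, r = a, b
--     old_s, s = 1, 0
--     old_t, t = 0, 1
--     while r:
--         quotient, remainder = divmod(old_r, r)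
--         old_r, r = r, remainder
--         old_s, s = s, old_s - quotient * s
--         old_t, t = t, old_t - quotient * t
--     lcm = a * b // old_r
--     if q < p:
--         q += lcm
--     factor, mismatch = divmod(q - p, old_r)
--     # If the cycle periods share a factor, not all permutations will be possible
--     # due to synchronisation at offsetted positions.
--     if mismatch != 0:
--         raise Exception('no possibility of cycle match')
--     old_r, old_s, old_t = old_r * factor, old_s * factor, old_t * factor
--     old_s = old_s % b
--     if old_s <= 0:
--         old_s += b
--     return Cycle(p + a * old_s, lcm)
-- ===== SOURCE B (Python) =====
-- from collections import namedtuple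
--
-- Cycle = namedtuple('Cycle', ['offset', 'period'])
--
-- def extgcd(a, b):
--     # standard recursive extended Euclid: returns (g, s, t) with s*a + t*b == g
--     if b == 0:
--         return a, 1, 0
--     g, s, t = extgcd(b, a % b)
--     return g, t, s - (a // b) * t
--
-- def _crt(p, a, q, b):
--     # combine x ≡ p (mod a) with x ≡ q (mod b); caller guarantees a <= b
--     g, s, _ = extgcd(a, b)
--     lcm = a // g * b
--     if q < p:
--         q += lcm
--     factor, mismatch = divmod(q - p, g)
--     if mismatch:
--         raise Exception('no possibility of cycle match')
--     k = s * factor % b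
--     if k <= 0:
--         k += b
--     return Cycle(p + a * k, lcm)
--
-- def overlap_cycle(arg1: Cycle, arg2: Cycle) -> Cycle:
--     (p, a), (q, b) = arg1, arg2
--     if a > b:
--         return _crt(q, b, p, a)
--     return _crt(p, a, q, b)
-- ===== Notes on version B (the rewrite author's own statement) =====
-- stated objective: alternative
-- what changed: The inline six-variable iterative extended-Euclidean while-loop and inline driver are replaced by a recursive extgcd helper plus a separate _crt(p,a,q,b) combiner invoked with pre-swapped arguments (the swap becomes a call-site choice, the t coefficient is dropped, and lcm is computed as a//g*b).
import Mathlib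
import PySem

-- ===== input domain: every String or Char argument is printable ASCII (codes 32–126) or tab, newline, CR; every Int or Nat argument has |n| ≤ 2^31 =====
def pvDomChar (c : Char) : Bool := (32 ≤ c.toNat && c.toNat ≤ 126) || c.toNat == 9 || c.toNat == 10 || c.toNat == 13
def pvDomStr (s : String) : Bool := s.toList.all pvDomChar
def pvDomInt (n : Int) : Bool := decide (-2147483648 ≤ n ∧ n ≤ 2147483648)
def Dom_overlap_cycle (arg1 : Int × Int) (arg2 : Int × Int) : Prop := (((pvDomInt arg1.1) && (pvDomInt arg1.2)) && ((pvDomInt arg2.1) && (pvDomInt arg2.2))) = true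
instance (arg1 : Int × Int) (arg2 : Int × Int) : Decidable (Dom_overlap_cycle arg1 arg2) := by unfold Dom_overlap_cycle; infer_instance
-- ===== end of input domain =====

-- B replaces A's six-variable iterative Bezout loop and inline driver by a recursive
-- extgcd plus a separate _crt helper called with pre-swapped arguments (objective: alternative).

-- termination helper (cited by both recursions): Python mod strictly shrinks |r|
theorem pvModAbsLt (a b : Int) (h : b ≠ 0) : (PySem.Int.mod a b).natAbs < b.natAbs := by
  rcases lt_or_gt_of_ne h with hb | hb
  · have := PySem.Int.mod_neg_bounds a hb; omega
  · have h1 := PySem.Int.mod_nonneg a hb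
    have h2 := PySem.Int.mod_lt a hb
    omega

-- ===== PORT A =====
-- the while-loop of A, state (old_r, r, old_s, s, old_t, t)
def overlapLoop (old_r r old_s s old_t t : Int) : Int × Int × Int :=
  if hr : r = 0 then (old_r, old_s, old_t)
  else
    overlapLoop r (PySem.Int.mod old_r r)
      s (old_s - PySem.Int.floordiv old_r r * s)
      t (old_t - PySem.Int.floordiv old_r r * t)
termination_by r.natAbs
decreasing_by exact pvModAbsLt old_r r hr

def overlap_cycle (arg1 : Int × Int) (arg2 : Int × Int) : Int × Int :=
  let p := arg1.1; let a := arg1.2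
  let q := arg2.1; let b := arg2.2
  let a' := if a > b then b else a
  let b' := if a > b then a else b
  let p' := if a > b then q else p
  let q' := if a > b then p else q
  let res := overlapLoop a' b' 1 0 0 1
  let old_r := res.1; let old_s := res.2.1
  let lcm := PySem.Int.floordiv (a' * b') old_r
  let q2 := if q' < p' then q' + lcm else q'
  let factor := PySem.Int.floordiv (q2 - p') old_r
  -- Python raises here when the divmod remainder is nonzero; excluded by Pre_
  let os := PySem.Int.mod (old_s * factor) b'
  let os2 := if os ≤ 0 then os + b' else os
  (p' + a' * os2, lcm)

-- ===== PORT B =====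
def extgcd (a b : Int) : Int × Int × Int :=
  if hb : b = 0 then (a, 1, 0)
  else
    let r := extgcd b (PySem.Int.mod a b)
    (r.1, r.2.2, r.2.1 - PySem.Int.floordiv a b * r.2.2)
termination_by b.natAbs
decreasing_by exact pvModAbsLt a b hb

-- combine x ≡ p (mod a) with x ≡ q (mod b); the caller guarantees a ≤ b
def crtCombine (p a q b : Int) : Int × Int :=
  let gst := extgcd a b
  let lcm := PySem.Int.floordiv a gst.1 * b
  let q2 := if q < p then q + lcm else q
  let k := PySem.Int.mod (gst.2.1 * PySem.Int.floordiv (q2 - p) gst.1) b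
  (p + a * (if k ≤ 0 then k + b else k), lcm)

def overlap_cycle_alt (arg1 : Int × Int) (arg2 : Int × Int) : Int × Int :=
  if arg1.2 > arg2.2 then crtCombine arg2.1 arg2.2 arg1.1 arg1.2
  else crtCombine arg1.1 arg1.2 arg2.1 arg2.2

-- ===== PRECONDITION & SPEC =====
-- Pre_ excludes exactly the inputs where Python A raises: max(a,b) = 0 makes the final
-- `% b` (or `a*b//g`) divide by zero, and gcd ∤ (q-p) triggers the explicit Exception.
def Pre_overlap_cycle (arg1 : Int × Int) (arg2 : Int × Int) : Prop :=
  max arg1.2 arg2.2 ≠ 0 ∧ (Int.gcd arg1.2 arg2.2 : Int) ∣ (arg2.1 - arg1.1)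
instance (arg1 : Int × Int) (arg2 : Int × Int) : Decidable (Pre_overlap_cycle arg1 arg2) := by unfold Pre_overlap_cycle; infer_instance
def pvWitness_overlap_cycle : (Int × Int) × (Int × Int) := ((1, 4), (3, 6))

def Spec_overlap_cycle (arg1 : Int × Int) (arg2 : Int × Int) (out : Int × Int) : Prop := out = overlap_cycle_alt arg1 arg2
instance (arg1 : Int × Int) (arg2 : Int × Int) (out : Int × Int) : Decidable (Spec_overlap_cycle arg1 arg2 out) := by unfold Spec_overlap_cycle; infer_instance

-- ===== CLAIM (what is proved, stated in full; the proofs are below) =====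
def Claim_equal_overlap_cycle : Prop := ∀ (arg1 : Int × Int) (arg2 : Int × Int), Dom_overlap_cycle arg1 arg2 → Pre_overlap_cycle arg1 arg2 → Spec_overlap_cycle arg1 arg2 (overlap_cycle arg1 arg2)

-- ===== LEMMAS AND PROOFS =====

-- A's iterative loop from any state equals the recursive extgcd's answer combined
-- linearly with the state's Bezout columns.
theorem overlapLoop_eq_extgcd (x y s0 s1 t0 t1 : Int) :
    overlapLoop x y s0 s1 t0 t1 =
      ((extgcd x y).1,
       (extgcd x y).2.1 * s0 + (extgcd x y).2.2 * s1,
       (extgcd x y).2.1 * t0 + (extgcd x y).2.2 * t1) := by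
  by_cases hy : y = 0
  · subst hy
    rw [overlapLoop, extgcd]
    simp
  · rw [overlapLoop, extgcd]
    simp only [hy, dite_false]
    rw [overlapLoop_eq_extgcd y (PySem.Int.mod x y) s1 (s0 - PySem.Int.floordiv x y * s1)
        t1 (t0 - PySem.Int.floordiv x y * t1)]
    ring_nf
termination_by y.natAbs
decreasing_by exact pvModAbsLt x y hy

-- the recursive extgcd's first component divides both arguments
theorem extgcd_dvd (x y : Int) : (extgcd x y).1 ∣ x ∧ (extgcd x y).1 ∣ y := by
  by_cases hy : y = 0
  · subst hy; rw [extgcd]; simp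
  · rw [extgcd]
    simp only [hy, dite_false]
    obtain ⟨h1, h2⟩ := extgcd_dvd y (PySem.Int.mod x y)
    refine ⟨?_, h1⟩
    have hx := PySem.Int.floordiv_mul_add_mod x y
    have hsum := dvd_add (Dvd.dvd.mul_left h1 (PySem.Int.floordiv x y)) h2
    rwa [hx] at hsum
termination_by y.natAbs
decreasing_by exact pvModAbsLt x y hy

-- exact division distributes: g ∣ a, g ≠ 0 → (a*b)//g = (a//g)*b
theorem floordiv_mul_of_dvd (a b g : Int) (hg : g ≠ 0) (h : g ∣ a) :
    PySem.Int.floordiv (a * b) g = PySem.Int.floordiv a g * b := by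
  obtain ⟨c, rfl⟩ := h
  have h1 : PySem.Int.floordiv (g * c * b) g = c * b := by
    simp [PySem.Int.floordiv, mul_assoc, Int.mul_fdiv_cancel_left _ hg]
  have h2 : PySem.Int.floordiv (g * c) g = c := by
    simp [PySem.Int.floordiv, Int.mul_fdiv_cancel_left _ hg]
  rw [h1, h2]

-- the common shape of one swap branch: A's computation with arguments (p,a,q,b)
-- equals crtCombine p a q b, provided b ≠ 0
theorem branch_eq (p a q b : Int) (hb : b ≠ 0) :
    (let res := overlapLoop a b 1 0 0 1
     let old_r := res.1; let old_s := res.2.1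
     let lcm := PySem.Int.floordiv (a * b) old_r
     let q2 := if q < p then q + lcm else q
     let factor := PySem.Int.floordiv (q2 - p) old_r
     let os := PySem.Int.mod (old_s * factor) b
     ((p + a * (if os ≤ 0 then os + b else os), lcm) : Int × Int))
    = crtCombine p a q b := by
  have hg : (extgcd a b).1 ≠ 0 := by
    intro h0
    exact hb (by simpa [h0] using (extgcd_dvd a b).2)
  have hlcm : PySem.Int.floordiv (a * b) (extgcd a b).1
      = PySem.Int.floordiv a (extgcd a b).1 * b :=
    floordiv_mul_of_dvd a b _ hg (extgcd_dvd a b).1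
  simp only [crtCombine, overlapLoop_eq_extgcd, hlcm]
  ring_nf

-- ===== VERDICT (by name: the statement is the Claim_ definition above) =====
theorem overlap_cycle_spec : Claim_equal_overlap_cycle := by
  intro arg1 arg2 _ hpre
  unfold Spec_overlap_cycle overlap_cycle overlap_cycle_alt
  obtain ⟨hmax, -⟩ := hpre
  by_cases hab : arg1.2 > arg2.2
  · simp only [hab, if_true]
    exact branch_eq arg2.1 arg2.2 arg1.1 arg1.2 (by omega)
  · simp only [hab, if_false]
    exact branch_eq arg1.1 arg1.2 arg2.1 arg2.2 (by simp at hab; omega)
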